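-- pv_equiv track=rewrite | github.com/soundingreen/professional-internship-historical | m24_load_javier_vFINAL/m24_functions.py | extract_areas
-- ===== SOURCE A (Python) =====
-- def extract_areas(electrodes,s_areas=['S1','S2','MPC-left','MPC-right','VPC','M1','DPC']):
--     e=list(electrodes[1])
--     a_in_electrode=dict()
--     for sub in s_areas:
--         el = [i for i in e if sub  in i]
--         if len(el)>0:
--             a_in_electrode.update({sub:el})
--     return a_in_electrode
-- ===== SOURCE B (Python) =====
-- def extract_areas(electrodes, s_areas=['S1','S2','MPC-left','MPC-right','VPC','M1','DPC']):
--     e = list(electrodes[1])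
--     areas = list(dict.fromkeys(s_areas))
--     groups = {}
--     for name in e:
--         for sub in areas:
--             if sub in name:
--                 groups.setdefault(sub, []).append(name)
--     return {sub: groups[sub] for sub in areas if sub in groups}
-- ===== Notes on version B (the rewrite author's own statement) =====
-- stated objective: alternative
-- what changed: B makes a single electrode-major pass that groups each electrode into every matching area's list via a lazily-created dict (setdefault) over the deduplicated area list, then emits the groups in area order; A instead filters the whole electrode list once per area occurrence.
import Mathlib
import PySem

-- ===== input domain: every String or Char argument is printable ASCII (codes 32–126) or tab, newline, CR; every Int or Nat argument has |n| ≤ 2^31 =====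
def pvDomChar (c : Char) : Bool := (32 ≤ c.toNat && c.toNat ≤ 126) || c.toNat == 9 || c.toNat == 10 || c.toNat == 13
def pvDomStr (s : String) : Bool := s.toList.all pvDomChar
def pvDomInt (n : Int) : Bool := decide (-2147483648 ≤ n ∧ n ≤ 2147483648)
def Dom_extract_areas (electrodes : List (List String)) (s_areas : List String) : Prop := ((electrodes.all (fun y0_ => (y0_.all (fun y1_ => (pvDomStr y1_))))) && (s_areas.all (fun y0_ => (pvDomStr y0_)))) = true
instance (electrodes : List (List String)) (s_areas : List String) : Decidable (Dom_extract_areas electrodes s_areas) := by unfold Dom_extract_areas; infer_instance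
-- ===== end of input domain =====

-- B replaces A's area-major "filter the electrode list once per area" by a single electrode-major
-- pass that groups each electrode into every matching area's list in a lazily-created dict
-- (alternative decomposition, same asymptotic cost).

-- ===== PORT A =====
def extract_areas (electrodes : List (List String)) (s_areas : List String) : List (String × List String) :=
  let e : List String := (PySem.List.pyGet? electrodes 1).getD []   -- e = list(electrodes[1]); Pre_ makes the index valid
  (s_areas.foldl (fun a_in_electrode sub =>
      let el := e.filter (fun i => PySem.Str.isIn sub i)
      if 0 < el.length then a_in_electrode.insert sub el else a_in_electrode)
    PySem.Dict.empty).items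

-- ===== PORT B =====
def extract_areas_alt (electrodes : List (List String)) (s_areas : List String) : List (String × List String) :=
  let e : List String := (PySem.List.pyGet? electrodes 1).getD []
  let areas := PySem.List.dedup s_areas
  let groups := e.foldl (fun d name =>
      areas.foldl (fun d sub =>
          if PySem.Str.isIn sub name then d.modify sub [] (fun v => v ++ [name]) else d) d)
    PySem.Dict.empty
  (areas.foldl (fun out sub =>
      if groups.contains sub then out.insert sub (groups.getD sub []) else out)
    PySem.Dict.empty).items

-- ===== PRECONDITION & SPEC =====
-- Python A evaluates electrodes[1]: it raises IndexError unless electrodes has at least two rows.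
def Pre_extract_areas (electrodes : List (List String)) (s_areas : List String) : Prop :=
  1 < electrodes.length
instance (electrodes : List (List String)) (s_areas : List String) : Decidable (Pre_extract_areas electrodes s_areas) := by unfold Pre_extract_areas; infer_instance

def pvWitness_extract_areas : List (List String) × List String := ([[], ["xS1", "M1y"]], ["S1", "M1"])

def Spec_extract_areas (electrodes : List (List String)) (s_areas : List String) (out : List (String × List String)) : Prop := out = extract_areas_alt electrodes s_areas
instance (electrodes : List (List String)) (s_areas : List String) (out : List (String × List String)) : Decidable (Spec_extract_areas electrodes s_areas out) := by unfold Spec_extract_areas; infer_instance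

-- ===== CLAIM (what is proved, stated in full; the proofs are below) =====
def Claim_equal_extract_areas : Prop := ∀ (electrodes : List (List String)) (s_areas : List String), Dom_extract_areas electrodes s_areas → Pre_extract_areas electrodes s_areas → Spec_extract_areas electrodes s_areas (extract_areas electrodes s_areas)

-- ===== LEMMAS AND PROOFS =====

-- the electrodes of e whose name contains sub
def pvMatch (e : List String) (sub : String) : List String :=
  e.filter (fun i => PySem.Str.isIn sub i)

-- the (area, electrode) match pairs, electrode-major (the order B's nested loop visits them)
def pvPairs (areas e : List String) : List (String × String) :=
  e.flatMap (fun n => (areas.filter (fun s => PySem.Str.isIn s n)).map (fun s => (s, n)))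

theorem pv_get?_insertFold (F : String → List String) (l : List String)
    (d : PySem.Dict String (List String)) (k : String) :
    (l.foldl (fun d s => d.insert s (F s)) d).get? k
      = if k ∈ l then some (F k) else d.get? k := by
  induction l generalizing d with
  | nil => simp
  | cons a t ih =>
    simp only [List.foldl_cons, ih, List.mem_cons, PySem.Dict.get?_insert]
    by_cases h1 : k ∈ t <;> by_cases h2 : k = a <;> simp [h1, h2]

theorem pv_groups_eq_pairsFold (areas e : List String) (d : PySem.Dict String (List String)) :
    e.foldl (fun d name =>
        areas.foldl (fun d sub =>
            if PySem.Str.isIn sub name then d.modify sub [] (fun v => v ++ [name]) else d) d) d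
      = (pvPairs areas e).foldl (fun d p => d.modify p.1 [] (fun v => v ++ [p.2])) d := by
  induction e generalizing d with
  | nil => simp [pvPairs]
  | cons n t ih =>
    simp only [pvPairs, List.flatMap_cons, List.foldl_append, List.foldl_cons]
    rw [ih]
    congr 1
    rw [PySem.List.foldl_if_eq_foldl_filter (fun sub => PySem.Str.isIn sub n)
        (fun (d : PySem.Dict String (List String)) sub => d.modify sub [] (fun v => v ++ [n])),
      List.foldl_map]

theorem pv_pairs_filter (areas e : List String) (hnd : areas.Nodup) (c : String) :
    (pvPairs areas e).filter (fun p => p.1 == c)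
      = if c ∈ areas then (e.filter (fun n => PySem.Str.isIn c n)).map (fun n => (c, n)) else [] := by
  induction e with
  | nil => simp [pvPairs]
  | cons n t ih =>
    have hsplit : pvPairs areas (n :: t)
        = ((areas.filter (fun s => PySem.Str.isIn s n)).map (fun s => (s, n))) ++ pvPairs areas t := by
      simp [pvPairs]
    rw [hsplit, List.filter_append]
    have hpart : ((areas.filter (fun s => PySem.Str.isIn s n)).map (fun s => (s, n))).filter
        (fun p => p.1 == c)
        = if c ∈ areas ∧ PySem.Str.isIn c n then [(c, n)] else [] := by
      rw [List.filter_map]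
      have : ((fun p => p.1 == c) ∘ (fun s => (s, n))) = (fun s => s == c) := rfl
      rw [this, List.filter_filter]
      have : (areas.filter (fun a => a == c && PySem.Str.isIn a n))
          = (areas.filter (fun a => a == c)).filter (fun a => PySem.Str.isIn a n) := by
        rw [List.filter_filter]
        apply List.filter_congr
        intro x _
        cases h : (x == c) <;> simp
      rw [this, List.filter_beq]
      by_cases hc : c ∈ areas
      · rw [List.count_eq_one_of_mem hnd hc]
        by_cases hin : PySem.Str.isIn c n = true
        · have hin' : PySem.Chars.isIn c.toList n.toList = true := by simpa using hin
          simp [hc, hin']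
        · have hin' : ¬ PySem.Chars.isIn c.toList n.toList = true := by simpa using hin
          simp [hc, hin']
      · rw [List.count_eq_zero_of_not_mem hc]
        simp [hc]
    rw [hpart, ih]
    by_cases hc : c ∈ areas
    · simp only [hc, true_and, if_true, List.filter_cons]
      split <;> simp
    · simp [hc]

theorem pv_mem_pairsKeys (areas e : List String) (c : String) :
    c ∈ (pvPairs areas e).map (fun p => p.1) ↔ c ∈ areas ∧ pvMatch e c ≠ [] := by
  simp only [pvPairs, pvMatch, List.map_flatMap, List.mem_flatMap, List.map_map, List.mem_map,
    List.mem_filter, ne_eq, List.filter_eq_nil_iff]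
  push Not
  constructor
  · rintro ⟨n, hn, s, ⟨hs, hin⟩, rfl⟩
    exact ⟨hs, ⟨n, hn, by simpa using hin⟩⟩
  · rintro ⟨hc, n, hn, hin⟩
    exact ⟨n, hn, c, ⟨hc, by simpa using hin⟩, rfl⟩

theorem pv_ofList_filter (q : String → Bool) (l : List String) :
    PySem.Set.ofList (l.filter q) = (PySem.Set.ofList l).filter q := by
  induction l with
  | nil => simp
  | cons a t ih =>
    rw [PySem.Set.ofList_cons, List.filter_cons]
    by_cases hq : q a = true
    · rw [hq, if_pos rfl, PySem.Set.ofList_cons, ih, List.filter_cons_of_pos hq]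
      congr 1
      simp only [PySem.Set.discard, List.filter_filter]
      apply List.filter_congr
      intro x _
      exact Bool.and_comm _ _
    · rw [if_neg (by simp [hq]), ih, List.filter_cons_of_neg (by simp [hq])]
      simp only [PySem.Set.discard, List.filter_filter]
      apply List.filter_congr
      intro x _
      cases hx : x == a
      · simp
      · have hxa : x = a := by simpa using hx
        subst hxa
        simp [hq]

theorem pv_portA_eq (electrodes : List (List String)) (s_areas : List String) :
    extract_areas electrodes s_areas
      = (PySem.Set.ofList (s_areas.filter
            (fun s => decide (pvMatch ((PySem.List.pyGet? electrodes 1).getD []) s ≠ [])))).map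
          (fun k => (k, pvMatch ((PySem.List.pyGet? electrodes 1).getD []) k)) := by
  unfold extract_areas
  dsimp only
  set e : List String := (PySem.List.pyGet? electrodes 1).getD [] with he
  rw [show (fun (a_in_electrode : PySem.Dict String (List String)) sub =>
        let el := e.filter (fun i => PySem.Str.isIn sub i)
        if 0 < el.length then a_in_electrode.insert sub el else a_in_electrode)
      = (fun (d : PySem.Dict String (List String)) sub =>
        if 0 < (pvMatch e sub).length then d.insert sub (pvMatch e sub) else d) from rfl]
  rw [PySem.List.foldl_ite_eq_foldl_filter (fun sub => 0 < (pvMatch e sub).length)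
      (fun (d : PySem.Dict String (List String)) sub => d.insert sub (pvMatch e sub))]
  rw [List.filter_congr (fun x _ => by
      show decide (0 < (pvMatch e x).length) = decide (pvMatch e x ≠ [])
      simp [List.length_pos_iff])]
  set lA := s_areas.filter (fun s => decide (pvMatch e s ≠ [])) with hlA
  have hkeys : (lA.foldl (fun (d : PySem.Dict String (List String)) s => d.insert s (pvMatch e s))
      PySem.Dict.empty).keys = PySem.Set.ofList lA := by
    rw [PySem.Dict.keys_foldl_insert lA (fun _ s => pvMatch e s)]
    simp [PySem.Set.update_nil_left]
  rw [PySem.Dict.items_eq_map_keys _ (by rw [hkeys]; exact PySem.Set.nodup_ofList lA) [], hkeys]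
  apply List.map_congr_left
  intro k hk
  have hkl : k ∈ lA := by simpa [PySem.Set.mem_ofList] using hk
  rw [PySem.Dict.getD_eq_get?_getD, pv_get?_insertFold, if_pos hkl]
  rfl

theorem pv_portB_eq (electrodes : List (List String)) (s_areas : List String) :
    extract_areas_alt electrodes s_areas
      = ((PySem.Set.ofList s_areas).filter
            (fun s => decide (pvMatch ((PySem.List.pyGet? electrodes 1).getD []) s ≠ []))).map
          (fun k => (k, pvMatch ((PySem.List.pyGet? electrodes 1).getD []) k)) := by
  unfold extract_areas_alt
  dsimp only
  set e : List String := (PySem.List.pyGet? electrodes 1).getD [] with he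
  have hded : PySem.List.dedup s_areas = PySem.Set.ofList s_areas := by
    simp [PySem.List.dedup_eq_ofList]
  rw [hded]
  set areas : List String := PySem.Set.ofList s_areas with hareas
  have hnd : areas.Nodup := PySem.Set.nodup_ofList s_areas
  set groups : PySem.Dict String (List String) := e.foldl (fun d name =>
      areas.foldl (fun d sub =>
          if PySem.Str.isIn sub name then d.modify sub [] (fun v => v ++ [name]) else d) d)
    PySem.Dict.empty with hgroups0
  have hgroups : groups = (pvPairs areas e).foldl
      (fun d p => d.modify p.1 [] (fun v => v ++ [p.2])) PySem.Dict.empty := by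
    rw [hgroups0, pv_groups_eq_pairsFold]
  have hkeysG : groups.keys = PySem.Set.ofList ((pvPairs areas e).map (fun p => p.1)) := by
    rw [hgroups,
      PySem.Dict.keys_foldl_modify_key (pvPairs areas e) (fun p => p.1) []
        (fun _ p => (fun v => v ++ [p.2])) PySem.Dict.empty]
    simp [PySem.Set.update_nil_left]
  have hcont : ∀ s, groups.contains s = true ↔ (s ∈ areas ∧ pvMatch e s ≠ []) := by
    intro s
    rw [PySem.Dict.contains_iff_mem_keys, hkeysG]
    rw [show (s ∈ PySem.Set.ofList ((pvPairs areas e).map (fun p => p.1)))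
        ↔ s ∈ (pvPairs areas e).map (fun p => p.1) from by
      constructor <;> intro h <;> simpa [PySem.Set.mem_ofList] using h]
    exact pv_mem_pairsKeys areas e s
  have hgetD : ∀ s, s ∈ areas → groups.getD s [] = pvMatch e s := by
    intro s hs
    rw [hgroups, PySem.Dict.getD_foldl_modify_append, pv_pairs_filter areas e hnd s, if_pos hs]
    simp [pvMatch, List.map_map]
  rw [PySem.List.foldl_if_eq_foldl_filter (fun sub => groups.contains sub)
      (fun (out : PySem.Dict String (List String)) sub => out.insert sub (groups.getD sub []))]
  rw [List.filter_congr (fun x hx => by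
      show groups.contains x = decide (pvMatch e x ≠ [])
      cases h : groups.contains x
      · by_cases hp : pvMatch e x ≠ []
        · exact absurd ((hcont x).mpr ⟨hx, hp⟩) (by simp [h])
        · simp [hp]
      · have := ((hcont x).mp h).2
        simp [this])]
  set lB : List String := areas.filter (fun s => decide (pvMatch e s ≠ [])) with hlB
  have hndB : lB.Nodup := hnd.filter _
  have hkeysB : (lB.foldl (fun (out : PySem.Dict String (List String)) s =>
      out.insert s (groups.getD s [])) PySem.Dict.empty).keys = lB := by
    rw [PySem.Dict.keys_foldl_insert lB (fun _ s => groups.getD s [])]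
    simp [PySem.Set.update_nil_left, PySem.Set.ofList_eq_self_of_nodup lB hndB]
  rw [PySem.Dict.items_eq_map_keys _ (by rw [hkeysB]; exact hndB) [], hkeysB]
  apply List.map_congr_left
  intro k hk
  have hka : k ∈ areas := (List.mem_filter.mp hk).1
  rw [PySem.Dict.getD_eq_get?_getD, pv_get?_insertFold, if_pos hk]
  simp [hgetD k hka]

-- ===== VERDICT (by name: the statement is the Claim_ definition above) =====
theorem extract_areas_spec : Claim_equal_extract_areas := by
  intro electrodes s_areas _ _
  unfold Spec_extract_areas
  rw [pv_portA_eq, pv_portB_eq, pv_ofList_filter]
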